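-- pv_equiv track=rewrite | github.com/hfxunlp/transformer | tools/check/dynb/slayer.py | giter
-- ===== SOURCE A (Python) =====
-- from math import floor
--
-- def giter(lin, nsep=20):
--
-- 	_nd = len(lin)
-- 	_nuni = max(floor(_nd / nsep), 1)
-- 	_dnuni = _nuni * 2
-- 	lind = 0
-- 	while lind < _nd:
-- 		if lind + _dnuni > _nd:
-- 			rind = _nd
-- 		else:
-- 			rind = lind + _nuni
-- 		yield lin[lind:rind]
-- 		lind = rind
-- ===== SOURCE B (Python) =====
-- def giter(lin, nsep=20):
--     nd = len(lin)
--     nuni = max(nd // nsep, 1)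
--     starts = list(range(0, nd, nuni))
--     if nd % nuni != 0 and len(starts) > 1:
--         starts.pop()
--     for s in starts[:-1]:
--         yield lin[s:s + nuni]
--     if starts:
--         yield lin[starts[-1]:nd]
-- ===== Notes on version B (the rewrite author's own statement) =====
-- stated objective: alternative
-- what changed: B replaces A's while-loop with its per-iteration lookahead (merge the runt chunk if the remainder is short) by computing the start-index table range(0, nd, nuni) up front, applying one drop-last correction when nd % nuni != 0, and slicing once per start.
import Mathlib
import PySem

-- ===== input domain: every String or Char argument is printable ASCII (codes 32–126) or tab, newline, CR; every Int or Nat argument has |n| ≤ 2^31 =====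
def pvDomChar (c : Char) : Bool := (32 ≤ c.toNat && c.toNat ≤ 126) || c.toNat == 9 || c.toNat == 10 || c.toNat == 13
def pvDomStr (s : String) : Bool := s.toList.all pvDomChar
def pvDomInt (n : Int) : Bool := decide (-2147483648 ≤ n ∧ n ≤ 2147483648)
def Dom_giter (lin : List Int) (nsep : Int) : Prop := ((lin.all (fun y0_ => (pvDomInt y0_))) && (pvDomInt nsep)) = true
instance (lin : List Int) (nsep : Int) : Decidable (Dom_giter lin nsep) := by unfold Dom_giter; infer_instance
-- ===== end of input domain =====

-- B builds the start-index table range(0, nd, nuni) up front with one drop-last correction,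
-- instead of A's while-loop with its per-iteration lookahead (same cost, different decomposition).

-- ===== PORT A =====
-- A's while-loop; the fuel is only a termination guard (lind grows by ≥ nuni ≥ 1 each
-- iteration, so fuel = len(lin)+1 always suffices).
def giterLoopA (lin : List Int) (nd nuni dnuni : Int) : Nat → Int → List (List Int)
  | 0, _ => []
  | fuel + 1, lind =>
    if lind < nd then
      (if lind + dnuni > nd then nd else lind + nuni) |> fun rind =>
        PySem.List.slice lin (some lind) (some rind) :: giterLoopA lin nd nuni dnuni fuel rind
    else []

def giter (lin : List Int) (nsep : Int) : List (List Int) :=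
  let nd : Int := lin.length
  -- floor(_nd / nsep): float division then floor.  Exact as integer floor division on Dom:
  -- 0 ≤ nd ≤ 2^31 and |nsep| ≤ 2^31, so the correctly-rounded float quotient never crosses an integer.
  let nuni := max (PySem.Int.floordiv nd nsep) 1
  let dnuni := nuni * 2
  giterLoopA lin nd nuni dnuni (lin.length + 1) 0

-- ===== PORT B =====
def giter_alt (lin : List Int) (nsep : Int) : List (List Int) :=
  let nd : Int := lin.length
  let nuni := max (PySem.Int.floordiv nd nsep) 1
  let starts0 := PySem.List.pyRange 0 nd nuni
  let starts := if PySem.Int.mod nd nuni ≠ 0 ∧ 1 < starts0.length then starts0.dropLast else starts0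
  starts.dropLast.map (fun s => PySem.List.slice lin (some s) (some (s + nuni))) ++
    (match starts.getLast? with
     | some s => [PySem.List.slice lin (some s) (some nd)]
     | none => [])

-- ===== PRECONDITION & SPEC =====
-- Pre_ excludes exactly nsep = 0, on which Python A raises ZeroDivisionError (as does B).
def Pre_giter (lin : List Int) (nsep : Int) : Prop := nsep ≠ 0
instance (lin : List Int) (nsep : Int) : Decidable (Pre_giter lin nsep) := by unfold Pre_giter; infer_instance
def pvWitness_giter : List Int × Int := ([1, 2, 3, 4, 5], 2)

def Spec_giter (lin : List Int) (nsep : Int) (out : List (List Int)) : Prop := out = giter_alt lin nsep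
instance (lin : List Int) (nsep : Int) (out : List (List Int)) : Decidable (Spec_giter lin nsep out) := by unfold Spec_giter; infer_instance

-- ===== CLAIM (what is proved, stated in full; the proofs are below) =====
def Claim_equal_giter : Prop := ∀ (lin : List Int) (nsep : Int), Dom_giter lin nsep → Pre_giter lin nsep → Spec_giter lin nsep (giter lin nsep)

-- ===== LEMMAS AND PROOFS =====

-- B's chunk list as a function of the current left index: the induction target.
def emitB (lin : List Int) (nd nuni : Int) (S : List Int) : List (List Int) :=
  S.dropLast.map (fun s => PySem.List.slice lin (some s) (some (s + nuni))) ++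
    (match S.getLast? with
     | some s => [PySem.List.slice lin (some s) (some nd)]
     | none => [])

def chunksB (lin : List Int) (nd nuni lind : Int) : List (List Int) :=
  emitB lin nd nuni
    (if PySem.Int.mod (nd - lind) nuni ≠ 0 ∧ 1 < (PySem.List.pyRange lind nd nuni).length
     then (PySem.List.pyRange lind nd nuni).dropLast
     else PySem.List.pyRange lind nd nuni)

lemma getLast?_cons_ne {α : Type} (x : α) {l : List α} (h : l ≠ []) :
    (x :: l).getLast? = l.getLast? := by
  cases l with
  | nil => exact absurd rfl h
  | cons a t => simp [List.getLast?_cons_cons]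

lemma pyRange_nil_of_pos {a b s : Int} (hs : 0 < s) (h : b ≤ a) :
    PySem.List.pyRange a b s = [] := by
  rw [PySem.List.pyRange_of_pos a b hs, if_neg (by omega)]
  simp

lemma pyRange_cons_of_pos {a b s : Int} (hs : 0 < s) (hab : a < b) :
    PySem.List.pyRange a b s = a :: PySem.List.pyRange (a + s) b s := by
  rw [PySem.List.pyRange_of_pos a b hs, PySem.List.pyRange_of_pos (a + s) b hs, if_pos hab]
  by_cases h2 : a + s < b
  · rw [if_pos h2]
    have hdiv : (b - a + s - 1) / s = (b - (a + s) + s - 1) / s + 1 := by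
      have h := Int.add_mul_ediv_right (b - (a + s) + s - 1) 1 (by omega : s ≠ 0)
      have harg : b - a + s - 1 = b - (a + s) + s - 1 + 1 * s := by ring
      rw [harg, h]
    have hpos : 0 ≤ (b - (a + s) + s - 1) / s := Int.ediv_nonneg (by omega) (by omega)
    have htn : ((b - a + s - 1) / s).toNat = ((b - (a + s) + s - 1) / s).toNat + 1 := by
      omega
    rw [htn, List.range_succ_eq_map]
    simp only [List.map_cons, List.map_map, Nat.cast_zero, mul_zero, add_zero, List.cons.injEq]
    refine ⟨by trivial, List.map_congr_left ?_⟩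
    intro k _
    simp only [Function.comp_apply, Nat.succ_eq_add_one]
    push_cast
    ring
  · rw [if_neg h2]
    have h1 : (b - a + s - 1) / s = 1 := by
      rw [← PySem.Int.floordiv_eq_ediv_of_pos hs]
      exact (PySem.Int.floordiv_eq_iff_of_pos hs).mpr ⟨by omega, by omega⟩
    rw [h1]
    simp

lemma giterLoopA_of_done {lin : List Int} {nd nuni dnuni lind : Int} {fuel : Nat}
    (h : ¬ lind < nd) : giterLoopA lin nd nuni dnuni fuel lind = [] := by
  cases fuel with
  | zero => rfl
  | succ f => simp [giterLoopA, h]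

lemma emitB_nil (lin : List Int) (nd nuni : Int) : emitB lin nd nuni [] = [] := by
  unfold emitB; simp

lemma emitB_singleton (lin : List Int) (nd nuni x : Int) :
    emitB lin nd nuni [x] = [PySem.List.slice lin (some x) (some nd)] := by
  unfold emitB; simp

lemma emitB_cons (lin : List Int) (nd nuni x : Int) {X : List Int} (h : X ≠ []) :
    emitB lin nd nuni (x :: X) =
      PySem.List.slice lin (some x) (some (x + nuni)) :: emitB lin nd nuni X := by
  unfold emitB
  rw [List.dropLast_cons_of_ne_nil h, getLast?_cons_ne _ h]
  simp

-- chunksB at a non-final position peels off one full chunk of size nuni.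
lemma chunksB_step (lin : List Int) (nd nuni lind : Int) (hu : 0 < nuni)
    (h : lind + nuni * 2 ≤ nd) :
    chunksB lin nd nuni lind =
      PySem.List.slice lin (some lind) (some (lind + nuni)) :: chunksB lin nd nuni (lind + nuni) := by
  have h1 : lind < nd := by omega
  have h2 : lind + nuni < nd := by omega
  have hR'cons : PySem.List.pyRange (lind + nuni) nd nuni
      = (lind + nuni) :: PySem.List.pyRange (lind + nuni + nuni) nd nuni :=
    pyRange_cons_of_pos hu h2
  have hR'ne : PySem.List.pyRange (lind + nuni) nd nuni ≠ [] := by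
    rw [hR'cons]; simp
  have hmod : PySem.Int.mod (nd - lind) nuni = PySem.Int.mod (nd - (lind + nuni)) nuni := by
    rw [PySem.Int.mod_eq_emod_of_pos hu, PySem.Int.mod_eq_emod_of_pos hu]
    conv_lhs => rw [show nd - lind = nd - (lind + nuni) + nuni * 1 by ring]
    rw [Int.add_mul_emod_self_left]
  unfold chunksB
  rw [pyRange_cons_of_pos hu h1, hmod]
  by_cases hm : PySem.Int.mod (nd - (lind + nuni)) nuni ≠ 0
  · -- a runt exists: the drop-last correction fires on both sides
    have hne : lind + nuni * 2 ≠ nd := by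
      intro he
      apply hm
      rw [PySem.Int.mod_eq_zero_iff_dvd]
      exact ⟨1, by omega⟩
    have h3 : lind + nuni + nuni < nd := by omega
    have hR''cons : PySem.List.pyRange (lind + nuni + nuni) nd nuni
        = (lind + nuni + nuni) :: PySem.List.pyRange (lind + nuni + nuni + nuni) nd nuni :=
      pyRange_cons_of_pos hu h3
    have hlen : 1 < (PySem.List.pyRange (lind + nuni) nd nuni).length := by
      rw [hR'cons, hR''cons]; simp
    rw [if_pos ⟨hm, by simpa using Nat.lt_succ_of_lt hlen⟩, if_pos ⟨hm, hlen⟩]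
    have hdne : (PySem.List.pyRange (lind + nuni) nd nuni).dropLast ≠ [] := by
      rw [hR'cons, hR''cons]
      simp [List.dropLast_cons_of_ne_nil]
    rw [List.dropLast_cons_of_ne_nil hR'ne, emitB_cons lin nd nuni lind hdne]
  · -- exact fit: no drop on either side
    rw [if_neg (by tauto), if_neg (by tauto)]
    rw [emitB_cons lin nd nuni lind hR'ne]

-- chunksB at a final position (fewer than two full chunks remain) is a single chunk to nd.
lemma chunksB_last (lin : List Int) (nd nuni lind : Int) (hu : 0 < nuni)
    (h1 : lind < nd) (h2 : nd < lind + nuni * 2) :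
    chunksB lin nd nuni lind = [PySem.List.slice lin (some lind) (some nd)] := by
  unfold chunksB
  by_cases hs : nd ≤ lind + nuni
  · -- one start only
    rw [pyRange_cons_of_pos hu h1, pyRange_nil_of_pos hu hs, if_neg (by simp), emitB_singleton]
  · -- two starts and a runt chunk: the last start is dropped
    have hcons2 : PySem.List.pyRange (lind + nuni) nd nuni
        = (lind + nuni) :: PySem.List.pyRange (lind + nuni + nuni) nd nuni :=
      pyRange_cons_of_pos hu (by omega)
    have hnil : PySem.List.pyRange (lind + nuni + nuni) nd nuni = [] :=
      pyRange_nil_of_pos hu (by omega)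
    have hmod : PySem.Int.mod (nd - lind) nuni ≠ 0 := by
      intro h0
      rw [PySem.Int.mod_eq_zero_iff_dvd] at h0
      obtain ⟨k, hk⟩ := h0
      have hk1 : 1 < k := by
        have := Int.lt_of_mul_lt_mul_left (by omega : nuni * 1 < nuni * k) (le_of_lt hu)
        omega
      have : nuni * 2 ≤ nuni * k :=
        mul_le_mul_of_nonneg_left (by omega) (le_of_lt hu)
      omega
    rw [pyRange_cons_of_pos hu h1, hcons2, hnil, if_pos ⟨hmod, by simp⟩]
    simp [emitB_singleton]

-- Main loop invariant: A's while-loop from any left index equals B's table-driven chunks.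
lemma giterLoopA_eq_chunksB (lin : List Int) (nd nuni : Int) (hu : 0 < nuni) :
    ∀ (fuel : Nat) (lind : Int), (nd - lind).toNat < fuel →
      giterLoopA lin nd nuni (nuni * 2) fuel lind = chunksB lin nd nuni lind := by
  intro fuel
  induction fuel with
  | zero => intro lind hf; omega
  | succ f ih =>
    intro lind hf
    by_cases hl : lind < nd
    · rw [giterLoopA, if_pos hl]
      by_cases hbig : lind + nuni * 2 > nd
      · rw [if_pos hbig]
        simp only
        rw [giterLoopA_of_done (by omega), chunksB_last lin nd nuni lind hu hl hbig]
      · rw [if_neg hbig]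
        simp only
        rw [ih (lind + nuni) (by omega), chunksB_step lin nd nuni lind hu (by omega)]
    · rw [giterLoopA_of_done hl]
      unfold chunksB
      rw [pyRange_nil_of_pos hu (by omega), if_neg (by simp), emitB_nil]

-- ===== VERDICT (by name: the statement is the Claim_ definition above) =====
theorem giter_spec : Claim_equal_giter := by
  intro lin nsep _ _
  unfold Spec_giter
  have hu : 0 < max (PySem.Int.floordiv (lin.length : Int) nsep) 1 :=
    lt_of_lt_of_le zero_lt_one (le_max_right _ _)
  calc giter lin nsep
      = chunksB lin (lin.length : Int) (max (PySem.Int.floordiv (lin.length : Int) nsep) 1) 0 := by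
        simp only [giter]
        exact giterLoopA_eq_chunksB lin _ _ hu (lin.length + 1) 0 (by omega)
    _ = giter_alt lin nsep := by
        simp only [giter_alt, chunksB, emitB, sub_zero]
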